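-- pv_equiv track=rewrite | github.com/scshafe/multi-interface-tic-tac-toe | src/interfaces/ncursesterminal/printers.py | create_cross_piece
-- ===== SOURCE A (Python) =====
-- def create_cross_piece(size):
--     cross = [[" " for i in range(size*2)] for j in range(size*2)]
--     for i in range(size):
--         it_left = i
--         it_right = len(cross)-1-i
--         #top left
--         cross[i][it_left] = '\\'
--         #top right
--         cross[i][it_right] = '/'
--         #bottom left
--         cross[len(cross)-1-i][it_left] = '/'
--         #bottom right
--         cross[len(cross)-1-i][it_right] = '\\'
--     return cross
-- ===== SOURCE B (Python) =====
-- def create_cross_piece(size):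
--     n = size * 2
--     return [['\\' if r == c else '/' if r + c == n - 1 else ' ' for c in range(n)]
--             for r in range(n)]
-- ===== Notes on version B (the rewrite author's own statement) =====
-- stated objective: simpler
-- what changed: Replaces A's two-phase build (initialize an all-space grid, then loop over i in range(size) overwriting four diagonal cells per iteration) with a single nested comprehension that classifies every cell directly by position: '\' on the main diagonal r==c, '/' on the anti-diagonal r+c==n-1, space elsewhere.
import Mathlib
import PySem

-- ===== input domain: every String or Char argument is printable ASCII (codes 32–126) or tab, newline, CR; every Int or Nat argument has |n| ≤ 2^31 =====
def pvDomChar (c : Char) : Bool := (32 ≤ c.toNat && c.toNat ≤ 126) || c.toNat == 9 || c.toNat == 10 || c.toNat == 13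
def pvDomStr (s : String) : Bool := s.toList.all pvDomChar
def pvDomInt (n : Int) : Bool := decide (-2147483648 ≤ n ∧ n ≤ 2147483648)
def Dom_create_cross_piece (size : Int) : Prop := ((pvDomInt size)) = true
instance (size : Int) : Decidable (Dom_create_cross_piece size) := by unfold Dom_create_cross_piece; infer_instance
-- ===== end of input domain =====

-- B builds each cell directly from its coordinates (one nested comprehension) instead of
-- A's initialize-to-spaces-then-overwrite-the-diagonals two-phase loop; objective: simpler.

-- ===== PORT A =====
-- Python in-place assignment cross[r][c] = v; every index A uses is nonnegative and in
-- range (r, c ∈ [0, 2*size)), so Int.toNat + List.modify/List.set is exact here.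
def pySet2 (m : List (List String)) (r c : Int) (v : String) : List (List String) :=
  m.modify r.toNat (fun row => row.set c.toNat v)

def create_cross_piece (size : Int) : List (List String) :=
  let cross := (PySem.List.pyRange 0 (size*2) 1).map
    (fun _j => (PySem.List.pyRange 0 (size*2) 1).map (fun _i => (" " : String)))
  (PySem.List.pyRange 0 size 1).foldl (fun cross i =>
    let it_left := i
    let it_right := (cross.length : Int) - 1 - i
    let cross := pySet2 cross i it_left "\\"
    let cross := pySet2 cross i it_right "/"
    let cross := pySet2 cross ((cross.length : Int) - 1 - i) it_left "/"
    pySet2 cross ((cross.length : Int) - 1 - i) it_right "\\") cross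

-- ===== PORT B =====
def create_cross_piece_alt (size : Int) : List (List String) :=
  let n := size * 2
  (PySem.List.pyRange 0 n 1).map (fun r =>
    (PySem.List.pyRange 0 n 1).map (fun c =>
      if r = c then "\\" else if r + c = n - 1 then "/" else " "))

-- ===== PRECONDITION & SPEC =====
def Spec_create_cross_piece (size : Int) (out : List (List String)) : Prop := out = create_cross_piece_alt size
instance (size : Int) (out : List (List String)) : Decidable (Spec_create_cross_piece size out) := by unfold Spec_create_cross_piece; infer_instance

-- ===== CLAIM (what is proved, stated in full; the proofs are below) =====
def Claim_equal_create_cross_piece : Prop := ∀ (size : Int), Dom_create_cross_piece size → Spec_create_cross_piece size (create_cross_piece size)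

-- ===== LEMMAS AND PROOFS =====

-- cell value after k loop iterations of A: rows 0..k-1 and N-k..N-1 have their diagonal cells written
def pvF (N k r c : Int) : String :=
  if r = c ∧ (r < k ∨ N - k ≤ r) then "\\"
  else if r + c = N - 1 ∧ (r < k ∨ N - k ≤ r) then "/"
  else " "

def pvGrid (N k : Int) : List (List String) :=
  (PySem.List.pyRange 0 N 1).map (fun r => (PySem.List.pyRange 0 N 1).map (fun c => pvF N k r c))

@[simp] theorem pySet2_length (m : List (List String)) (r c : Int) (v : String) :
    (pySet2 m r c v).length = m.length := by
  simp [pySet2]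

theorem pvModify_map_pyRange {α : Type} (N : Int) (f : Int → α) (i : Int) (g : α → α)
    (hi0 : 0 ≤ i) (hiN : i < N) :
    ((PySem.List.pyRange 0 N 1).map f).modify i.toNat g
      = (PySem.List.pyRange 0 N 1).map (fun r => if r = i then g (f r) else f r) := by
  apply List.ext_getElem
  · simp [List.length_modify]
  · intro j hj hj'
    simp only [List.getElem_modify, List.getElem_map, PySem.List.getElem_pyRange_one]
    have hjN : j < N.toNat := by simpa [PySem.List.length_pyRange_one] using hj'
    by_cases hji : ((j : Int)) = i
    · simp [show i.toNat = j by omega, hji]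
    · simp [show ¬ i.toNat = j by omega, hji]

theorem pvSet_map_pyRange (N : Int) (f : Int → String) (c : Int) (v : String)
    (hc0 : 0 ≤ c) (hcN : c < N) :
    ((PySem.List.pyRange 0 N 1).map f).set c.toNat v
      = (PySem.List.pyRange 0 N 1).map (fun x => if x = c then v else f x) := by
  apply List.ext_getElem
  · simp
  · intro j hj hj'
    simp only [List.getElem_set, List.getElem_map, PySem.List.getElem_pyRange_one]
    have hjN : j < N.toNat := by simpa [PySem.List.length_pyRange_one] using hj'
    by_cases hjc : ((j : Int)) = c
    · simp [show c.toNat = j by omega, hjc]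
    · simp [show ¬ c.toNat = j by omega, hjc]

theorem pvSet2_grid (N : Int) (F : Int → Int → String) (r c : Int) (v : String)
    (hr0 : 0 ≤ r) (hrN : r < N) (hc0 : 0 ≤ c) (hcN : c < N) :
    pySet2 ((PySem.List.pyRange 0 N 1).map (fun x => (PySem.List.pyRange 0 N 1).map (fun y => F x y))) r c v
      = (PySem.List.pyRange 0 N 1).map (fun x => (PySem.List.pyRange 0 N 1).map
          (fun y => if x = r ∧ y = c then v else F x y)) := by
  unfold pySet2
  rw [pvModify_map_pyRange N (fun x => (PySem.List.pyRange 0 N 1).map (fun y => F x y)) r (fun row => row.set c.toNat v) hr0 hrN]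
  apply List.map_congr_left
  intro x hx
  by_cases hxr : x = r
  · rw [if_pos hxr, pvSet_map_pyRange N (fun y => F x y) c v hc0 hcN]
    apply List.map_congr_left
    intro y _
    by_cases hyc : y = c <;> simp [hxr, hyc]
  · rw [if_neg hxr]
    apply List.map_congr_left
    intro y _
    simp [hxr]

theorem pvGrid_length (N : Int) (k : Int) (h : 0 ≤ N) : ((pvGrid N k).length : Int) = N := by
  simp [pvGrid, PySem.List.length_pyRange_one]; omega

theorem pvStep (size : Int) (k : Int) (hk0 : 0 ≤ k) (hks : k < size) :
    (let cross := pvGrid (2*size) k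
     let it_left := k
     let it_right := (cross.length : Int) - 1 - k
     let cross := pySet2 cross k it_left "\\"
     let cross := pySet2 cross k it_right "/"
     let cross := pySet2 cross ((cross.length : Int) - 1 - k) it_left "/"
     pySet2 cross ((cross.length : Int) - 1 - k) it_right "\\")
      = pvGrid (2*size) (k+1) := by
  have hN : (0:Int) ≤ 2*size := by omega
  simp only [pySet2_length, pvGrid_length _ _ hN]
  conv_lhs => rw [pvGrid]
  rw [pvSet2_grid (2*size) (fun x y => pvF (2*size) k x y) k k "\\" hk0 (by omega) hk0 (by omega)]
  rw [pvSet2_grid (2*size) (fun x y => if x = k ∧ y = k then "\\" else pvF (2*size) k x y)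
        k (2*size - 1 - k) "/" hk0 (by omega) (by omega) (by omega)]
  rw [pvSet2_grid (2*size)
        (fun x y => if x = k ∧ y = 2*size - 1 - k then "/"
                    else if x = k ∧ y = k then "\\" else pvF (2*size) k x y)
        (2*size - 1 - k) k "/" (by omega) (by omega) hk0 (by omega)]
  rw [pvSet2_grid (2*size)
        (fun x y => if x = 2*size - 1 - k ∧ y = k then "/"
                    else if x = k ∧ y = 2*size - 1 - k then "/"
                    else if x = k ∧ y = k then "\\" else pvF (2*size) k x y)
        (2*size - 1 - k) (2*size - 1 - k) "\\" (by omega) (by omega) (by omega) (by omega)]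
  rw [pvGrid]
  apply List.map_congr_left
  intro r hr
  apply List.map_congr_left
  intro c hc
  rw [PySem.List.mem_pyRange_one] at hr hc
  unfold pvF
  split_ifs <;> first | rfl | omega

theorem pvLoop (size : Int) (hs : 0 < size) : ∀ (m : Nat), (m : Int) ≤ size →
    (PySem.List.pyRange 0 (m : Int) 1).foldl (fun cross i =>
      let it_left := i
      let it_right := (cross.length : Int) - 1 - i
      let cross := pySet2 cross i it_left "\\"
      let cross := pySet2 cross i it_right "/"
      let cross := pySet2 cross ((cross.length : Int) - 1 - i) it_left "/"
      pySet2 cross ((cross.length : Int) - 1 - i) it_right "\\") (pvGrid (2*size) 0)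
    = pvGrid (2*size) m := by
  intro m
  induction m with
  | zero => intro _; simp [PySem.List.pyRange_one_eq_nil]
  | succ m ih =>
    intro hm
    have hm' : (m : Int) ≤ size := by push_cast at hm ⊢; omega
    rw [show ((m + 1 : Nat) : Int) = (m : Int) + 1 by push_cast; ring,
        PySem.List.pyRange_one_succ_right (by positivity), List.foldl_append, ih hm']
    simpa using pvStep size m (by positivity) (by push_cast at hm; omega)

-- ===== VERDICT (by name: the statement is the Claim_ definition above) =====
theorem create_cross_piece_spec : Claim_equal_create_cross_piece := by
  intro size _
  unfold Spec_create_cross_piece create_cross_piece create_cross_piece_alt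
  by_cases hs : size ≤ 0
  · have h1 : PySem.List.pyRange 0 (size*2) 1 = [] := PySem.List.pyRange_one_eq_nil (by omega)
    have h2 : PySem.List.pyRange 0 size 1 = [] := PySem.List.pyRange_one_eq_nil (by omega)
    simp [h1, h2]
  · push Not at hs
    have hinit : (PySem.List.pyRange 0 (size*2) 1).map
        (fun _j => (PySem.List.pyRange 0 (size*2) 1).map (fun _i => (" " : String)))
        = pvGrid (2*size) 0 := by
      unfold pvGrid
      rw [show size*2 = 2*size by ring]
      apply List.map_congr_left
      intro r hr
      apply List.map_congr_left
      intro c hc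
      rw [PySem.List.mem_pyRange_one] at hr hc
      unfold pvF
      split_ifs <;> first | rfl | omega
    simp only [hinit]
    have := pvLoop size hs size.toNat (by omega)
    rw [show ((size.toNat : Nat) : Int) = size by omega] at this
    rw [this]
    unfold pvGrid
    rw [show size*2 = 2*size by ring]
    apply List.map_congr_left
    intro r hr
    apply List.map_congr_left
    intro c hc
    rw [PySem.List.mem_pyRange_one] at hr hc
    unfold pvF
    split_ifs <;> first | rfl | omega
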